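-- pv_equiv track=rewrite | github.com/KarolinaPSouza/dataset-pesquisa | 1674-Subordinates/14027693.py | solution
-- ===== SOURCE A (Python) =====
-- def solution(n, arr):
--     from collections import defaultdict
--
--     tree = defaultdict(list)
--
--     # Build Tree
--     for child, parent in enumerate(arr, start=2):
--         tree[parent].append(child)
--
--     sol = [0] * (n+1)
--     stack = [(1, False)]
--
--     while stack:
--         node, visited = stack.pop()
--         if not visited:
--             stack.append((node, True))
--             for child in tree[node]:
--                 stack.append((child, False))
--
--         else:
--             count = 0
--             for child in tree[node]:
--                 count += 1 + sol[child]
--             sol[node] = count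
--
--
--     return sol[1:]
-- ===== SOURCE B (Python) =====
-- def solution(n, arr):
--     # For every employee, walk the chain of superiors upward; an employee counts
--     # only if the chain reaches the root 1.  No tree structure, no DFS stack.
--     m = len(arr)
--     sol = [0] * (n + 1)
--     for c in range(2, m + 2):
--         chain = []
--         x = c
--         for _ in range(m + 1):
--             x = arr[x - 2]
--             if not (2 <= x <= m + 1):
--                 break
--             chain.append(x)
--         if x == 1:
--             sol[1] += 1
--             for v in chain:
--                 sol[v] += 1
--     return sol[1:]
-- ===== Notes on version B (the rewrite author's own statement) =====
-- stated objective: alternative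
-- what changed: Replaces A's adjacency-dict construction plus explicit-stack post-order DFS with a flat per-employee upward walk: each node follows its chain of superiors and, if that chain reaches the root 1, adds one to every superior on it; no dict, no stack, no tree traversal.
-- outside the precondition, e.g. on solution(2, [1, 5, 7]): A returns [1, 0], B returns [1, 0]
import Mathlib
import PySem

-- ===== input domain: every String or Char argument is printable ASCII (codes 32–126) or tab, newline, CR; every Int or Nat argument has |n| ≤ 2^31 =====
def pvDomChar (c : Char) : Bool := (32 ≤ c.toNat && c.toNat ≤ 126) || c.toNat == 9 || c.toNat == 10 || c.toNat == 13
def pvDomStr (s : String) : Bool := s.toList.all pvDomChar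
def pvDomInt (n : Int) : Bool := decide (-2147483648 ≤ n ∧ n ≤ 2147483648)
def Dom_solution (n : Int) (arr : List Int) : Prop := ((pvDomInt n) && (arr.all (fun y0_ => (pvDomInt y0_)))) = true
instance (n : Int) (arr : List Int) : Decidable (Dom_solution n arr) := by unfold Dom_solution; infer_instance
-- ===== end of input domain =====

-- B replaces A's adjacency-dict + explicit-stack post-order DFS by a flat per-employee upward
-- walk along the chain of superiors, counting only employees whose chain reaches the root 1;
-- objective: alternative (different algorithm, similar cost on the tested sizes).

-- ===== PORT A =====
-- tree = defaultdict(list); for child, parent in enumerate(arr, start=2): tree[parent].append(child)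
-- (defaultdict's tree[parent].append(child) is Dict.modify parent [] (· ++ [child]); the
--  defaultdict read tree[node] in the loop below is Dict.getD node [] — insert-on-read only
--  changes the dict's contents, never the value read, and the dict is not returned)
def pvBuildTree (arr : List Int) : PySem.Dict Int (List Int) :=
  (PySem.List.enumerate arr 2).foldl
    (fun tree p => tree.modify p.2 [] (· ++ [p.1])) PySem.Dict.empty

-- the while-stack loop; stack head = top (Python pops/pushes at the list's end); fuel is only a
-- totality guard ((len+2)^(len+4) is proved sufficient under Pre_ below)
def pvLoopA (tree : PySem.Dict Int (List Int)) :
    Nat → List (Int × Bool) → List Int → List Int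
  | 0, _, sol => sol
  | _ + 1, [], sol => sol
  | fuel + 1, (node, visited) :: rest, sol =>
    if !visited then
      pvLoopA tree fuel
        (((tree.getD node []).map (fun c => (c, false))).reverse ++ (node, true) :: rest) sol
    else
      let count := (tree.getD node []).foldl
        (fun acc child => acc + (1 + PySem.List.pyGetD sol child 0)) 0
      pvLoopA tree fuel rest (PySem.List.pySetD sol node count)

def solution (n : Int) (arr : List Int) : List Int :=
  let tree := pvBuildTree arr
  let sol := List.replicate (n + 1).toNat 0
  let sol := pvLoopA tree ((arr.length + 2) ^ (arr.length + 4)) [(1, false)] sol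
  PySem.List.slice sol (some 1) none

-- ===== PORT B =====
-- the inner 'for _ in range(m+1): x = arr[x-2]; if not (2 <= x <= m+1): break; chain.append(x)'
def pvWalk (arr : List Int) : Nat → Int → List Int → (List Int × Int)
  | 0, x, chain => (chain, x)
  | f + 1, x, chain =>
    let y := PySem.List.pyGetD arr (x - 2) 0
    if 2 ≤ y ∧ y ≤ (arr.length : Int) + 1 then pvWalk arr f y (chain ++ [y])
    else (chain, y)

def solution_alt (n : Int) (arr : List Int) : List Int :=
  let m := arr.length
  let sol := List.replicate (n + 1).toNat 0
  let sol := (PySem.List.pyRange 2 ((m : Int) + 2) 1).foldl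
    (fun sol c =>
      let w := pvWalk arr (m + 1) c []
      if w.2 = 1 then
        let sol := PySem.List.pySetD sol 1 (PySem.List.pyGetD sol 1 0 + 1)
        w.1.foldl (fun sol v => PySem.List.pySetD sol v (PySem.List.pyGetD sol v 0 + 1)) sol
      else sol) sol
  PySem.List.slice sol (some 1) none

-- ===== PRECONDITION & SPEC =====
-- Pre_ requires n ≥ 1 and (len(arr) ≤ n - 1 or 1 ∉ arr): either every node index 2..len+1
-- fits into the sol array, or no node's parent chain can reach the root (so both sides touch
-- only sol[1]).  A raises IndexError exactly when a node REACHABLE from root 1 exceeds n —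
-- reachability is not a closed-form condition, so this sufficient bound is used; it excludes
-- some inputs with unreachable high nodes on which A returns (and B returns the same value).
def Pre_solution (n : Int) (arr : List Int) : Prop :=
  1 ≤ n ∧ ((arr.length : Int) ≤ n - 1 ∨ (1 : Int) ∉ arr)
instance (n : Int) (arr : List Int) : Decidable (Pre_solution n arr) := by
  unfold Pre_solution; infer_instance
def pvWitness_solution : Int × List Int := (3, [1, 1])

def Spec_solution (n : Int) (arr : List Int) (out : List Int) : Prop := out = solution_alt n arr
instance (n : Int) (arr : List Int) (out : List Int) : Decidable (Spec_solution n arr out) := by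
  unfold Spec_solution; infer_instance

-- ===== CLAIM (what is proved, stated in full; the proofs are below) =====
def Claim_equal_solution : Prop := ∀ (n : Int) (arr : List Int),
  Dom_solution n arr → Pre_solution n arr → Spec_solution n arr (solution n arr)

-- ===== LEMMAS AND PROOFS =====

-- x is a valid non-root node index
def pvInR (arr : List Int) (x : Int) : Prop := 2 ≤ x ∧ x ≤ (arr.length : Int) + 1
def pvChain (arr : List Int) (x : Int) : List Int := (pvWalk arr (arr.length + 1) x []).1
def pvFin (arr : List Int) (x : Int) : Int := (pvWalk arr (arr.length + 1) x []).2
-- depth of a node in the rooted part of the forest (junk elsewhere)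
def pvDepth (arr : List Int) (x : Int) : Nat :=
  if x = 1 then 0 else (pvChain arr x).length + 1

-- the parent-iteration map
def pvIter (arr : List Int) : Nat → Int → Int
  | 0, x => x
  | j + 1, x => pvIter arr j (PySem.List.pyGetD arr (x - 2) 0)

theorem pvWalk_append (arr : List Int) :
    ∀ (f : Nat) (x : Int) (ch : List Int),
      pvWalk arr f x ch = (ch ++ (pvWalk arr f x []).1, (pvWalk arr f x []).2) := by
  intro f
  induction f with
  | zero => intro x ch; simp [pvWalk]
  | succ f ih =>
    intro x ch
    rw [pvWalk, pvWalk]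
    split
    · rw [ih _ (ch ++ [_]), ih _ ([] ++ [_])]
      simp
    · simp

theorem pvIter_add (arr : List Int) : ∀ (j k : Nat) (x : Int),
    pvIter arr (j + k) x = pvIter arr k (pvIter arr j x) := by
  intro j
  induction j with
  | zero => intro k x; rw [Nat.zero_add]; rfl
  | succ j ih =>
    intro k x
    have h1 : j + 1 + k = (j + k) + 1 := by omega
    rw [h1, pvIter, pvIter, ih]

theorem pvWalk_spec (arr : List Int) : ∀ (f : Nat) (x : Int),
    (pvWalk arr f x []).1 =
        (List.range (pvWalk arr f x []).1.length).map (fun j => pvIter arr (j + 1) x) ∧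
      (∀ j, j < (pvWalk arr f x []).1.length → pvInR arr (pvIter arr (j + 1) x)) ∧
      (((pvWalk arr f x []).1.length < f ∧
          (pvWalk arr f x []).2 = pvIter arr ((pvWalk arr f x []).1.length + 1) x ∧
          ¬ pvInR arr (pvWalk arr f x []).2) ∨
        ((pvWalk arr f x []).1.length = f ∧ (pvWalk arr f x []).2 = pvIter arr f x)) := by
  intro f
  induction f with
  | zero => intro x; exact ⟨by simp [pvWalk], by simp [pvWalk], Or.inr ⟨by simp [pvWalk], rfl⟩⟩
  | succ f ih =>
    intro x
    rw [pvWalk]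
    by_cases hy : 2 ≤ PySem.List.pyGetD arr (x - 2) 0 ∧
        PySem.List.pyGetD arr (x - 2) 0 ≤ (arr.length : Int) + 1
    · rw [if_pos hy, List.nil_append, pvWalk_append arr f _ [_]]
      obtain ⟨ih1, ih2, ih3⟩ := ih (PySem.List.pyGetD arr (x - 2) 0)
      set y := PySem.List.pyGetD arr (x - 2) 0 with hy'
      set W := pvWalk arr f y [] with hW
      have hiter1 : pvIter arr 1 x = y := rfl
      have hshift : ∀ j : Nat, pvIter arr (j + 1) y = pvIter arr (j + 2) x := fun j => rfl
      simp only [List.singleton_append, List.length_cons]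
      refine ⟨?_, ?_, ?_⟩
      · rw [List.range_succ_eq_map, List.map_cons, List.map_map]
        refine List.cons_eq_cons.mpr ⟨hiter1.symm, ?_⟩
        conv_lhs => rw [ih1]
        apply List.map_congr_left
        intro j _
        simp only [Function.comp_apply, Nat.succ_eq_add_one]
        rw [hshift]
      · intro j hj
        cases j with
        | zero => exact hy
        | succ j =>
          have hj2 := ih2 j (by omega)
          rw [hshift] at hj2
          have h2' : j + 1 + 1 = j + 2 := rfl
          rw [h2']
          exact hj2
      · rcases ih3 with ⟨h1, h2, h3⟩ | ⟨h1, h2⟩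
        · left
          refine ⟨by omega, ?_, h3⟩
          rw [h2, hshift]
        · right
          refine ⟨by omega, ?_⟩
          rw [h2]
          rfl
    · rw [if_neg hy]
      refine ⟨by simp, by simp, Or.inl ⟨by simp, rfl, hy⟩⟩

-- exits forced by an out-of-range final value on an in-range start
theorem pvWalk_exits (arr : List Int) (f : Nat) (x : Int) (hx : pvInR arr x)
    (hexit : ¬ pvInR arr (pvWalk arr f x []).2) :
    (pvWalk arr f x []).1.length < f ∧
      (pvWalk arr f x []).2 = pvIter arr ((pvWalk arr f x []).1.length + 1) x := by
  obtain ⟨_, h2, h3⟩ := pvWalk_spec arr f x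
  rcases h3 with ⟨a, b, c⟩ | ⟨a, b⟩
  · exact ⟨a, b⟩
  · exfalso
    cases hL : (pvWalk arr f x []).1.length with
    | zero =>
      have hf : f = 0 := by omega
      rw [b, hf] at hexit
      exact hexit hx
    | succ L =>
      have hin := h2 L (by omega)
      have hf : f = L + 1 := by omega
      rw [b, hf] at hexit
      exact hexit hin

theorem pvWalk_trace_inj (arr : List Int) (f : Nat) (x : Int) (hx : pvInR arr x)
    (hexit : ¬ pvInR arr (pvWalk arr f x []).2) :
    ∀ a b : Nat, a < b → b ≤ (pvWalk arr f x []).1.length + 1 →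
      pvIter arr a x ≠ pvIter arr b x := by
  obtain ⟨_, h2, _⟩ := pvWalk_spec arr f x
  obtain ⟨hlt, hfin⟩ := pvWalk_exits arr f x hx hexit
  intro a b hab hbL heq
  set L := (pvWalk arr f x []).1.length with hL
  have hInR : ∀ j : Nat, j ≤ L → pvInR arr (pvIter arr j x) := by
    intro j hj
    cases j with
    | zero => exact hx
    | succ j => exact h2 j (by omega)
  have hprop : pvIter arr (a + (L + 1 - b)) x = pvIter arr (b + (L + 1 - b)) x := by
    rw [pvIter_add, pvIter_add, heq]
  have hb' : b + (L + 1 - b) = L + 1 := by omega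
  rw [hb'] at hprop
  have hmem : pvInR arr (pvIter arr (a + (L + 1 - b)) x) := hInR _ (by omega)
  rw [hprop, ← hfin] at hmem
  exact hexit hmem

theorem pvWalk_len_le (arr : List Int) (f : Nat) (x : Int) (hx : pvInR arr x)
    (hexit : ¬ pvInR arr (pvWalk arr f x []).2) :
    (pvWalk arr f x []).1.length + 1 ≤ arr.length := by
  set L := (pvWalk arr f x []).1.length with hL
  obtain ⟨_, h2, _⟩ := pvWalk_spec arr f x
  have hInR : ∀ j : Nat, j ≤ L → pvInR arr (pvIter arr j x) := by
    intro j hj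
    cases j with
    | zero => exact hx
    | succ j => exact h2 j (by omega)
  have hinj := pvWalk_trace_inj arr f x hx hexit
  set T : List Int := (List.range (L + 1)).map (fun j => pvIter arr j x) with hT
  have hnd : T.Nodup := by
    rw [hT]
    refine List.Nodup.map_on ?_ List.nodup_range
    intro a ha b hb heq
    by_contra hne
    rcases Nat.lt_or_ge a b with h | h
    · exact hinj a b h (by have := List.mem_range.mp hb; omega) heq
    · exact hinj b a (by omega) (by have := List.mem_range.mp ha; omega) heq.symm
  have hsub : ∀ y ∈ T, y ∈ Finset.Icc (2 : Int) ((arr.length : Int) + 1) := by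
    intro y hy
    rw [hT] at hy
    obtain ⟨j, hj, rfl⟩ := List.mem_map.mp hy
    have := hInR j (by simpa using (List.mem_range.mp hj))
    rw [Finset.mem_Icc]
    exact this
  have hcard : T.length ≤ (Finset.Icc (2 : Int) ((arr.length : Int) + 1)).card := by
    calc T.length = T.toFinset.card := (List.toFinset_card_of_nodup hnd).symm
    _ ≤ _ := Finset.card_le_card (fun y hy => hsub y (List.mem_toFinset.mp hy))
  have hicc : (Finset.Icc (2 : Int) ((arr.length : Int) + 1)).card = arr.length := by
    rw [Int.card_Icc]
    omega
  rw [hT] at hcard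
  simp at hcard
  omega

theorem pvWalk_fuel_eq (arr : List Int) :
    ∀ (f f' : Nat) (x : Int), pvInR arr x → ¬ pvInR arr (pvWalk arr f x []).2 →
      (pvWalk arr f x []).1.length + 1 ≤ f' → pvWalk arr f' x [] = pvWalk arr f x [] := by
  intro f
  induction f with
  | zero =>
    intro f' x hx hexit _
    exact absurd hx hexit
  | succ f ih =>
    intro f' x hx hexit hf'
    obtain ⟨f'', rfl⟩ : ∃ k, f' = k + 1 := ⟨f' - 1, by omega⟩
    rw [pvWalk, pvWalk]
    by_cases hy : 2 ≤ PySem.List.pyGetD arr (x - 2) 0 ∧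
        PySem.List.pyGetD arr (x - 2) 0 ≤ (arr.length : Int) + 1
    · rw [if_pos hy, if_pos hy, List.nil_append,
        pvWalk_append arr f'' _ [_], pvWalk_append arr f _ [_]]
      have hexit' : ¬ pvInR arr (pvWalk arr f (PySem.List.pyGetD arr (x - 2) 0) []).2 := by
        rw [pvWalk, if_pos hy, List.nil_append, pvWalk_append arr f _ [_]] at hexit
        exact hexit
      have hlen : (pvWalk arr f (PySem.List.pyGetD arr (x - 2) 0) []).1.length + 1 ≤ f'' := by
        rw [pvWalk, if_pos hy, List.nil_append, pvWalk_append arr f _ [_]] at hf'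
        simp at hf'
        omega
      rw [ih f'' _ hy hexit' hlen]
    · rw [if_neg hy, if_neg hy]

theorem pvInR_one (arr : List Int) : ¬ pvInR arr 1 := by
  unfold pvInR; omega

-- structure of the chain of a rooted node: empty (parent is the root) or parent-cons
theorem pvChain_cases (arr : List Int) (x : Int) (hfin : pvFin arr x = 1) :
    (¬ pvInR arr (PySem.List.pyGetD arr (x - 2) 0) ∧
      PySem.List.pyGetD arr (x - 2) 0 = 1 ∧ pvChain arr x = []) ∨
    (pvInR arr (PySem.List.pyGetD arr (x - 2) 0) ∧
      pvFin arr (PySem.List.pyGetD arr (x - 2) 0) = 1 ∧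
      pvChain arr x =
        PySem.List.pyGetD arr (x - 2) 0 :: pvChain arr (PySem.List.pyGetD arr (x - 2) 0)) := by
  by_cases hin : pvInR arr (PySem.List.pyGetD arr (x - 2) 0)
  · right
    have hin2 : 2 ≤ PySem.List.pyGetD arr (x - 2) 0 ∧
        PySem.List.pyGetD arr (x - 2) 0 ≤ (arr.length : Int) + 1 := hin
    have h1 : pvWalk arr (arr.length + 1) x [] =
        (PySem.List.pyGetD arr (x - 2) 0 ::
            (pvWalk arr arr.length (PySem.List.pyGetD arr (x - 2) 0) []).1,
          (pvWalk arr arr.length (PySem.List.pyGetD arr (x - 2) 0) []).2) := by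
      rw [pvWalk, if_pos hin2, List.nil_append, pvWalk_append arr arr.length _ [_]]
      rw [List.singleton_append]
    have hfin' : (pvWalk arr arr.length (PySem.List.pyGetD arr (x - 2) 0) []).2 = 1 := by
      unfold pvFin at hfin
      rw [h1] at hfin
      exact hfin
    have hexit' : ¬ pvInR arr (pvWalk arr arr.length (PySem.List.pyGetD arr (x - 2) 0) []).2 := by
      rw [hfin']
      exact pvInR_one arr
    have hstable : pvWalk arr (arr.length + 1) (PySem.List.pyGetD arr (x - 2) 0) [] =
        pvWalk arr arr.length (PySem.List.pyGetD arr (x - 2) 0) [] :=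
      pvWalk_fuel_eq arr arr.length (arr.length + 1) _ hin hexit'
        (by have := pvWalk_len_le arr arr.length _ hin hexit'; omega)
    refine ⟨hin, ?_, ?_⟩
    · unfold pvFin
      rw [hstable, hfin']
    · unfold pvChain
      rw [h1, hstable]
  · left
    have hin2 : ¬ (2 ≤ PySem.List.pyGetD arr (x - 2) 0 ∧
        PySem.List.pyGetD arr (x - 2) 0 ≤ (arr.length : Int) + 1) := hin
    have h1 : pvWalk arr (arr.length + 1) x [] = ([], PySem.List.pyGetD arr (x - 2) 0) := by
      rw [pvWalk, if_neg hin2]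
    have h2 : pvFin arr x = PySem.List.pyGetD arr (x - 2) 0 := by
      unfold pvFin
      rw [h1]
    refine ⟨hin, by rw [← h2]; exact hfin, by unfold pvChain; rw [h1]⟩

theorem pvChain_mem_InR (arr : List Int) (f : Nat) (x : Int) :
    ∀ u ∈ (pvWalk arr f x []).1, pvInR arr u := by
  obtain ⟨h1, h2, _⟩ := pvWalk_spec arr f x
  intro u hu
  rw [h1] at hu
  obtain ⟨j, hj, rfl⟩ := List.mem_map.mp hu
  exact h2 j (by simpa using List.mem_range.mp hj)

theorem pvChain_nodup (arr : List Int) (x : Int) (hx : pvInR arr x)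
    (hfin : pvFin arr x = 1) : (pvChain arr x).Nodup := by
  have hexit : ¬ pvInR arr (pvWalk arr (arr.length + 1) x []).2 := by
    show ¬ pvInR arr (pvFin arr x)
    rw [hfin]
    exact pvInR_one arr
  obtain ⟨h1, _, _⟩ := pvWalk_spec arr (arr.length + 1) x
  have hinj := pvWalk_trace_inj arr (arr.length + 1) x hx hexit
  unfold pvChain
  rw [h1]
  refine List.Nodup.map_on ?_ List.nodup_range
  intro a ha b hb heq
  by_contra hne
  rcases Nat.lt_or_ge a b with h | h
  · exact hinj (a + 1) (b + 1) (by omega)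
      (by have := List.mem_range.mp hb; omega) heq
  · exact hinj (b + 1) (a + 1) (by omega)
      (by have := List.mem_range.mp ha; omega) heq.symm

-- every member of a rooted chain is itself rooted
theorem pvChain_mem_rooted (arr : List Int) :
    ∀ (k : Nat) (x : Int), (pvChain arr x).length ≤ k → pvFin arr x = 1 →
      ∀ u ∈ pvChain arr x, pvInR arr u ∧ pvFin arr u = 1 := by
  intro k
  induction k with
  | zero =>
    intro x hk _ u hu
    have h0 : (pvChain arr x).length = 0 := by omega
    rw [List.length_eq_zero_iff] at h0
    rw [h0] at hu
    simp at hu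
  | succ k ih =>
    intro x hk hfin u hu
    rcases pvChain_cases arr x hfin with ⟨_, _, hch⟩ | ⟨hin, hfin', hch⟩
    · rw [hch] at hu; simp at hu
    · rw [hch] at hu
      rcases List.mem_cons.mp hu with rfl | hu'
      · exact ⟨hin, hfin'⟩
      · have hlen : (pvChain arr (PySem.List.pyGetD arr (x - 2) 0)).length ≤ k := by
          rw [hch] at hk
          simp at hk
          omega
        exact ih _ hlen hfin' u hu'

-- forward construction: a node whose parent is the root / a rooted node is itself rooted
theorem pvChain_child (arr : List Int) (c : Int) (hc : pvInR arr c) :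
    (PySem.List.pyGetD arr (c - 2) 0 = 1 → pvFin arr c = 1 ∧ pvChain arr c = []) ∧
    (pvInR arr (PySem.List.pyGetD arr (c - 2) 0) →
      pvFin arr (PySem.List.pyGetD arr (c - 2) 0) = 1 →
      pvFin arr c = 1 ∧ pvChain arr c =
        PySem.List.pyGetD arr (c - 2) 0 :: pvChain arr (PySem.List.pyGetD arr (c - 2) 0)) := by
  constructor
  · intro h1
    have hneg : ¬ (2 ≤ PySem.List.pyGetD arr (c - 2) 0 ∧
        PySem.List.pyGetD arr (c - 2) 0 ≤ (arr.length : Int) + 1) := by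
      rw [h1]
      intro hh
      omega
    constructor
    · unfold pvFin
      rw [pvWalk, if_neg hneg]
      simpa using h1
    · unfold pvChain
      rw [pvWalk, if_neg hneg]
  · intro hin hfin
    have hin2 : 2 ≤ PySem.List.pyGetD arr (c - 2) 0 ∧
        PySem.List.pyGetD arr (c - 2) 0 ≤ (arr.length : Int) + 1 := hin
    have h1 : pvWalk arr (arr.length + 1) c [] =
        (PySem.List.pyGetD arr (c - 2) 0 ::
            (pvWalk arr arr.length (PySem.List.pyGetD arr (c - 2) 0) []).1,
          (pvWalk arr arr.length (PySem.List.pyGetD arr (c - 2) 0) []).2) := by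
      rw [pvWalk, if_pos hin2, List.nil_append, pvWalk_append arr arr.length _ [_],
        List.singleton_append]
    have hexit : ¬ pvInR arr (pvWalk arr (arr.length + 1)
        (PySem.List.pyGetD arr (c - 2) 0) []).2 := by
      show ¬ pvInR arr (pvFin arr (PySem.List.pyGetD arr (c - 2) 0))
      rw [hfin]
      exact pvInR_one arr
    have hlen := pvWalk_len_le arr (arr.length + 1) _ hin hexit
    have hstable : pvWalk arr arr.length (PySem.List.pyGetD arr (c - 2) 0) [] =
        pvWalk arr (arr.length + 1) (PySem.List.pyGetD arr (c - 2) 0) [] :=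
      pvWalk_fuel_eq arr (arr.length + 1) arr.length _ hin hexit (by omega)
    constructor
    · unfold pvFin
      rw [h1, hstable]
      exact hfin
    · unfold pvChain
      rw [h1, hstable]

-- a node of the rooted tree: the root itself or a node whose superior chain reaches the root
def pvRt (arr : List Int) (v : Int) : Prop :=
  v = 1 ∨ (pvInR arr v ∧ pvFin arr v = 1)

-- children of node v (node i+2 has parent arr[i]); the depth guards are redundant on the
-- rooted part (mem_pvChildren_rooted below) and only make the recursions terminate
def pvChildren (arr : List Int) (v : Int) : List Nat :=
  (List.range arr.length).filterMap (fun i =>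
    if arr.getD i 0 = v ∧ pvDepth arr v < pvDepth arr ((i + 2 : Nat) : Int) ∧
        pvDepth arr ((i + 2 : Nat) : Int) ≤ arr.length + 2
    then some (i + 2) else none)

theorem mem_pvChildren {arr : List Int} {v : Int} {c : Nat} :
    c ∈ pvChildren arr v ↔
      ∃ i, i < arr.length ∧ arr.getD i 0 = v ∧
        pvDepth arr v < pvDepth arr ((i + 2 : Nat) : Int) ∧
        pvDepth arr ((i + 2 : Nat) : Int) ≤ arr.length + 2 ∧ c = i + 2 := by
  simp only [pvChildren, List.mem_filterMap, List.mem_range]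
  constructor
  · rintro ⟨i, hi, h⟩
    split at h
    · rename_i hc
      exact ⟨i, hi, hc.1, hc.2.1, hc.2.2, by simpa using h.symm⟩
    · simp at h
  · rintro ⟨i, hi, h1, h2, h3, h4⟩
    exact ⟨i, hi, by rw [if_pos ⟨h1, h2, h3⟩]; simp [h4]⟩

theorem pvChildren_bounds {arr : List Int} {v : Int} {c : Nat} (h : c ∈ pvChildren arr v) :
    2 ≤ c ∧ c ≤ arr.length + 1 ∧
      pvDepth arr v < pvDepth arr ((c : Nat) : Int) ∧
      pvDepth arr ((c : Nat) : Int) ≤ arr.length + 2 := by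
  obtain ⟨i, hi, _, h2, h3, h4⟩ := mem_pvChildren.mp h
  subst h4
  exact ⟨by omega, by omega, h2, h3⟩

theorem nodup_pvChildren (arr : List Int) (v : Int) : (pvChildren arr v).Nodup := by
  apply List.Nodup.filterMap
  · intro a a' b ha ha'
    split_ifs at ha ha' <;> simp_all <;> omega
  · exact List.nodup_range

def pvD (arr : List Int) (v : Int) : Int :=
  ((pvChildren arr v).attach.map (fun c => 1 + pvD arr ((c.1 : Nat) : Int))).sum
termination_by arr.length + 3 - pvDepth arr v
decreasing_by
  have := pvChildren_bounds c.2
  omega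

def pvIn (arr : List Int) (v u : Int) : Bool :=
  u = v || (pvChildren arr v).attach.any (fun c => pvIn arr ((c.1 : Nat) : Int) u)
termination_by arr.length + 3 - pvDepth arr v
decreasing_by
  have := pvChildren_bounds c.2
  omega

def pvSz (arr : List Int) (v : Int) : Nat :=
  1 + ((pvChildren arr v).attach.map (fun c => pvSz arr ((c.1 : Nat) : Int))).sum
termination_by arr.length + 3 - pvDepth arr v
decreasing_by
  have := pvChildren_bounds c.2
  omega

theorem pvD_eq (arr : List Int) (v : Int) :
    pvD arr v = ((pvChildren arr v).map (fun c => 1 + pvD arr ((c : Nat) : Int))).sum := by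
  rw [pvD]; simp

theorem pvIn_eq (arr : List Int) (v u : Int) :
    pvIn arr v u =
      (u = v || (pvChildren arr v).any (fun c => pvIn arr ((c : Nat) : Int) u)) := by
  rw [pvIn]; simp

theorem pvSz_eq (arr : List Int) (v : Int) :
    pvSz arr v = 1 + ((pvChildren arr v).map (fun c => pvSz arr ((c : Nat) : Int))).sum := by
  rw [pvSz]; simp

theorem pvIn_self (arr : List Int) (v : Int) : pvIn arr v v = true := by
  rw [pvIn_eq]; simp

-- a dictionary child of a rooted node is rooted, one level deeper
theorem pvRt_child (arr : List Int) (v : Int) (hv : pvRt arr v) (i : Nat)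
    (hi : i < arr.length) (hp : arr.getD i 0 = v) :
    pvInR arr ((i + 2 : Nat) : Int) ∧ pvFin arr ((i + 2 : Nat) : Int) = 1 ∧
      pvDepth arr ((i + 2 : Nat) : Int) = pvDepth arr v + 1 ∧
      pvDepth arr ((i + 2 : Nat) : Int) ≤ arr.length + 1 := by
  have hcin : pvInR arr ((i + 2 : Nat) : Int) := by
    unfold pvInR
    push_cast
    omega
  have hstep : PySem.List.pyGetD arr (((i + 2 : Nat) : Int) - 2) 0 = v := by
    have : ((i + 2 : Nat) : Int) - 2 = ((i : Nat) : Int) := by push_cast; ring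
    rw [this, PySem.List.pyGetD_natCast]
    exact hp
  have hch := pvChain_child arr ((i + 2 : Nat) : Int) hcin
  rcases hv with hv1 | ⟨hvin, hvfin⟩
  · obtain ⟨hfin, hchain⟩ := hch.1 (by rw [hstep, hv1])
    have hd : pvDepth arr ((i + 2 : Nat) : Int) = 1 := by
      unfold pvDepth
      rw [if_neg (by have := hcin.1; omega), hchain]
      simp
    refine ⟨hcin, hfin, ?_, by omega⟩
    rw [hd, hv1]
    unfold pvDepth
    simp
  · obtain ⟨hfin, hchain⟩ := hch.2 (by rw [hstep]; exact hvin) (by rw [hstep]; exact hvfin)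
    rw [hstep] at hchain
    have hexit : ¬ pvInR arr (pvWalk arr (arr.length + 1) v []).2 := by
      show ¬ pvInR arr (pvFin arr v)
      rw [hvfin]
      exact pvInR_one arr
    have hlenv := pvWalk_len_le arr (arr.length + 1) v hvin hexit
    have hdv : pvDepth arr v = (pvChain arr v).length + 1 := by
      unfold pvDepth
      rw [if_neg (by have := hvin.1; omega)]
    have hdc : pvDepth arr ((i + 2 : Nat) : Int) = (pvChain arr v).length + 2 := by
      unfold pvDepth
      rw [if_neg (by have := hcin.1; omega), hchain]
      simp
    refine ⟨hcin, hfin, by omega, ?_⟩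
    have : (pvChain arr v).length + 1 ≤ arr.length := hlenv
    omega

theorem mem_pvChildren_rooted {arr : List Int} {v : Int} (hv : pvRt arr v) {c : Nat} :
    c ∈ pvChildren arr v ↔ ∃ i, i < arr.length ∧ arr.getD i 0 = v ∧ c = i + 2 := by
  rw [mem_pvChildren]
  constructor
  · rintro ⟨i, hi, h1, _, _, h4⟩
    exact ⟨i, hi, h1, h4⟩
  · rintro ⟨i, hi, h1, h4⟩
    obtain ⟨_, _, hd, hb⟩ := pvRt_child arr v hv i hi h1
    exact ⟨i, hi, h1, by omega, by omega, h4⟩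

theorem pvRt_of_child {arr : List Int} {v : Int} (hv : pvRt arr v) {c : Nat}
    (hc : c ∈ pvChildren arr v) : pvRt arr ((c : Nat) : Int) := by
  obtain ⟨i, hi, h1, _, _, h4⟩ := mem_pvChildren.mp hc
  subst h4
  obtain ⟨ha, hb, _, _⟩ := pvRt_child arr v hv i hi h1
  exact Or.inr ⟨ha, hb⟩

theorem pvChildren_depth_rooted {arr : List Int} {v : Int} (hv : pvRt arr v) {c : Nat}
    (hc : c ∈ pvChildren arr v) : pvDepth arr ((c : Nat) : Int) = pvDepth arr v + 1 := by
  obtain ⟨i, hi, h1, _, _, h4⟩ := mem_pvChildren.mp hc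
  subst h4
  exact (pvRt_child arr v hv i hi h1).2.2.1

-- simultaneous subtree update: every index in the subtree of some d ∈ ds holds its final count
def pvUpdM (arr : List Int) (ds : List Int) (sol : List Int) : List Int :=
  (List.range sol.length).map
    (fun u => if ds.any (fun c => pvIn arr c ((u : Nat) : Int)) then pvD arr ((u : Nat) : Int)
      else sol.getD u 0)

theorem length_pvUpdM (arr : List Int) (ds : List Int) (sol : List Int) :
    (pvUpdM arr ds sol).length = sol.length := by
  simp [pvUpdM]

theorem getElem_pvUpdM (arr : List Int) (ds : List Int) (sol : List Int) (u : Nat)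
    (h : u < (pvUpdM arr ds sol).length) :
    (pvUpdM arr ds sol)[u] =
      if ds.any (fun c => pvIn arr c ((u : Nat) : Int)) then pvD arr ((u : Nat) : Int)
      else sol.getD u 0 := by
  simp [pvUpdM]

theorem getD_pvUpdM (arr : List Int) (ds : List Int) (sol : List Int) (u : Nat)
    (h : u < sol.length) :
    (pvUpdM arr ds sol).getD u 0 =
      if ds.any (fun c => pvIn arr c ((u : Nat) : Int)) then pvD arr ((u : Nat) : Int)
      else sol.getD u 0 := by
  unfold pvUpdM
  exact PySem.List.getD_map_range _ sol.length u 0 h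

theorem pvUpdM_nil (arr : List Int) (sol : List Int) : pvUpdM arr [] sol = sol := by
  apply List.ext_getElem (by simp [pvUpdM])
  intro i h1 h2
  rw [getElem_pvUpdM]
  simp [List.getD_eq_getElem?_getD, List.getElem?_eq_getElem h2]

theorem pvUpdM_step (arr : List Int) (d : Int) (ds : List Int) (sol : List Int) :
    pvUpdM arr ds (pvUpdM arr [d] sol) = pvUpdM arr (d :: ds) sol := by
  apply List.ext_getElem (by simp [length_pvUpdM])
  intro i h1 h2
  have hi : i < sol.length := by simpa [length_pvUpdM] using h1
  rw [getElem_pvUpdM, getElem_pvUpdM, getD_pvUpdM arr [d] sol i hi]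
  simp only [List.any_cons, List.any_nil, Bool.or_false]
  by_cases hds : ds.any (fun c => pvIn arr c ((i : Nat) : Int)) = true <;>
    by_cases hd : pvIn arr d ((i : Nat) : Int) = true <;> simp [hds, hd]

-- the partially-run while loop returns its accumulator on an empty stack
theorem pvLoopA_nil (tree : PySem.Dict Int (List Int)) (f : Nat) (sol : List Int) :
    pvLoopA tree f [] sol = sol := by
  cases f <;> rfl

theorem pvLoopA_push (tree : PySem.Dict Int (List Int)) (f : Nat) (node : Int)
    (rest : List (Int × Bool)) (sol : List Int) :
    pvLoopA tree (f + 1) ((node, false) :: rest) sol =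
      pvLoopA tree f
        (((tree.getD node []).map (fun c => (c, false))).reverse ++ (node, true) :: rest) sol := by
  simp [pvLoopA]

theorem pvLoopA_visit (tree : PySem.Dict Int (List Int)) (f : Nat) (node : Int)
    (rest : List (Int × Bool)) (sol : List Int) :
    pvLoopA tree (f + 1) ((node, true) :: rest) sol =
      pvLoopA tree f rest
        (PySem.List.pySetD sol node
          ((tree.getD node []).foldl
            (fun acc child => acc + (1 + PySem.List.pyGetD sol child 0)) 0)) := by
  simp [pvLoopA]

-- the adjacency dict A builds holds exactly pvChildren at every rooted key
theorem getD_buildTree_gen (L : List (Int × Int)) (D : PySem.Dict Int (List Int)) (p : Int) :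
    (L.foldl (fun tree q => tree.modify q.2 [] (· ++ [q.1])) D).getD p [] =
      D.getD p [] ++ (L.filter (fun q => q.2 = p)).map (·.1) := by
  induction L generalizing D with
  | nil => simp
  | cons q L ih =>
    simp only [List.foldl_cons, List.filter_cons]
    rw [ih, PySem.Dict.getD_modify]
    by_cases h : q.2 = p
    · simp [h, List.append_assoc]
    · have : ¬ p = q.2 := fun hh => h hh.symm
      simp [h, this]

theorem enum_eq (arr : List Int) : ∀ s : Int,
    PySem.List.enumerate arr s =
      (List.range arr.length).map (fun i : Nat => (s + (i : Int), arr.getD i 0)) := by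
  induction arr with
  | nil => intro s; simp [PySem.List.enumerate_nil]
  | cons a t ih =>
    intro s
    rw [PySem.List.enumerate_cons, ih (s + 1), List.length_cons, List.range_succ_eq_map]
    simp only [List.map_cons, List.map_map]
    refine List.cons_eq_cons.mpr ⟨by simp, ?_⟩
    apply List.map_congr_left
    intro i _
    simp only [Function.comp_apply, Nat.succ_eq_add_one, List.getD_cons_succ, Prod.mk.injEq]
    exact ⟨by push_cast; ring, trivial⟩

theorem tree_children_aux (arr : List Int) (v : Int) :
    ∀ l : List Nat,
      (∀ i ∈ l, arr.getD i 0 = v →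
        pvDepth arr v < pvDepth arr ((i + 2 : Nat) : Int) ∧
          pvDepth arr ((i + 2 : Nat) : Int) ≤ arr.length + 2) →
      ((l.map (fun i : Nat => ((2 : Int) + (i : Int), arr.getD i 0))).filter
          (fun q => q.2 = v)).map (·.1) =
        (l.filterMap
          (fun i => if arr.getD i 0 = v ∧ pvDepth arr v < pvDepth arr ((i + 2 : Nat) : Int) ∧
              pvDepth arr ((i + 2 : Nat) : Int) ≤ arr.length + 2
            then some (i + 2) else none)).map (fun c : Nat => (c : Int)) := by
  intro l
  induction l with
  | nil => intro _; simp
  | cons i l ih =>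
    intro hyp
    have ht := ih (fun j hj => hyp j (List.mem_cons_of_mem i hj))
    by_cases h : arr.getD i 0 = v
    · obtain ⟨hg1, hg2⟩ := hyp i List.mem_cons_self h
      rw [List.map_cons, List.filter_cons_of_pos (by simp only [decide_eq_true_eq]; exact h),
        List.map_cons, List.filterMap_cons, if_pos (And.intro h (And.intro hg1 hg2))]
      simp only [List.map_cons]
      rw [ht]
      congr 1
      push_cast
      ring
    · have h' : ¬ (arr.getD i 0 = v ∧ pvDepth arr v < pvDepth arr ((i + 2 : Nat) : Int) ∧
          pvDepth arr ((i + 2 : Nat) : Int) ≤ arr.length + 2) := fun hc => h hc.1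
      rw [List.map_cons, List.filter_cons_of_neg (by simp only [decide_eq_true_eq]; exact h),
        List.filterMap_cons, if_neg h']
      exact ht

theorem tree_getD (arr : List Int) (v : Int) (hv : pvRt arr v) :
    (pvBuildTree arr).getD v [] = (pvChildren arr v).map (fun c : Nat => (c : Int)) := by
  unfold pvBuildTree
  rw [getD_buildTree_gen, PySem.Dict.getD_empty, List.nil_append, enum_eq]
  unfold pvChildren
  apply tree_children_aux
  intro i hi he
  obtain ⟨_, _, hd, hb⟩ := pvRt_child arr v hv i (List.mem_range.mp hi) he
  omega

theorem pvRt_depth_le (arr : List Int) (v : Int) (hv : pvRt arr v) :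
    pvDepth arr v ≤ arr.length := by
  rcases hv with h1 | ⟨hin, hfin⟩
  · unfold pvDepth
    rw [if_pos h1]
    omega
  · have hexit : ¬ pvInR arr (pvWalk arr (arr.length + 1) v []).2 := by
      show ¬ pvInR arr (pvFin arr v)
      rw [hfin]
      exact pvInR_one arr
    have := pvWalk_len_le arr (arr.length + 1) v hin hexit
    unfold pvDepth
    rw [if_neg (by have := hin.1; omega)]
    exact this

-- one (v, False) frame is popped: the whole subtree of v is processed in exactly 2·pvSz v steps
theorem seqA (arr : List Int) (tree : PySem.Dict Int (List Int))
    (ds : List Nat)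
    (IH : ∀ c ∈ ds, ∀ (rest : List (Int × Bool)) (sol : List Int) (f : Nat),
      arr.length + 2 ≤ sol.length →
      pvLoopA tree (f + 2 * pvSz arr ((c : Nat) : Int)) ((((c : Nat) : Int), false) :: rest) sol =
        pvLoopA tree f rest (pvUpdM arr [((c : Nat) : Int)] sol)) :
    ∀ (rest : List (Int × Bool)) (sol : List Int) (f : Nat),
      arr.length + 2 ≤ sol.length →
      pvLoopA tree (f + (ds.map (fun c => 2 * pvSz arr ((c : Nat) : Int))).sum)
          (ds.map (fun c : Nat => (((c : Nat) : Int), false)) ++ rest) sol =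
        pvLoopA tree f rest (pvUpdM arr (ds.map (fun c : Nat => ((c : Nat) : Int))) sol) := by
  induction ds with
  | nil => intro rest sol f hl; simp [pvUpdM_nil]
  | cons d ds ih =>
    intro rest sol f hl
    have harith : f + ((d :: ds).map (fun c => 2 * pvSz arr ((c : Nat) : Int))).sum =
        (f + (ds.map (fun c => 2 * pvSz arr ((c : Nat) : Int))).sum) +
          2 * pvSz arr ((d : Nat) : Int) := by
      simp [List.sum_cons]
      omega
    rw [harith]
    simp only [List.map_cons, List.cons_append]
    rw [IH d List.mem_cons_self _ sol _ hl,
      ih (fun c hc => IH c (List.mem_cons_of_mem d hc)) rest (pvUpdM arr [((d : Nat) : Int)] sol) f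
        (by rw [length_pvUpdM]; exact hl),
      pvUpdM_step]

theorem keyA (arr : List Int) (tree : PySem.Dict Int (List Int))
    (Ht : ∀ w : Int, pvRt arr w →
      tree.getD w [] = (pvChildren arr w).map (fun c : Nat => (c : Int))) :
    ∀ (K : Nat) (v : Int), pvRt arr v → arr.length + 3 - pvDepth arr v ≤ K →
      ∀ (rest : List (Int × Bool)) (sol : List Int) (f : Nat),
        arr.length + 2 ≤ sol.length →
        pvLoopA tree (f + 2 * pvSz arr v) ((v, false) :: rest) sol =
          pvLoopA tree f rest (pvUpdM arr [v] sol) := by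
  intro K
  induction K with
  | zero =>
    intro v hv hm
    have := pvRt_depth_le arr v hv
    omega
  | succ K ih =>
    intro v hv hm rest sol f hl
    have hv1 : 1 ≤ v := by
      rcases hv with h | ⟨⟨h2, _⟩, _⟩
      · omega
      · omega
    have hsum : 2 * ((pvChildren arr v).map (fun c => pvSz arr ((c : Nat) : Int))).sum =
        ((pvChildren arr v).map (fun c => 2 * pvSz arr ((c : Nat) : Int))).sum := by
      induction pvChildren arr v with
      | nil => simp
      | cons c cs ihc => simp only [List.map_cons, List.sum_cons]; omega
    have hsz : f + 2 * pvSz arr v =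
        ((f + 1) +
          (((pvChildren arr v).reverse.map (fun c => 2 * pvSz arr ((c : Nat) : Int))).sum)) + 1 := by
      rw [pvSz_eq, List.map_reverse, List.sum_reverse]
      omega
    rw [hsz, pvLoopA_push, Ht v hv]
    have hframes : (((pvChildren arr v).map (fun c : Nat => (c : Int))).map
          (fun c => (c, false))).reverse =
        (pvChildren arr v).reverse.map (fun c : Nat => (((c : Nat) : Int), false)) := by
      rw [List.map_map, ← List.map_reverse]
      simp [Function.comp_def]
    rw [hframes,
      seqA arr tree (pvChildren arr v).reverse
        (fun c hc => by
          have hcmem := List.mem_reverse.mp hc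
          have hrt := pvRt_of_child hv hcmem
          have hd := pvChildren_depth_rooted hv hcmem
          exact ih ((c : Nat) : Int) hrt (by omega))
        ((v, true) :: rest) sol (f + 1) hl,
      pvLoopA_visit, Ht v hv]
    set sol' := pvUpdM arr ((pvChildren arr v).reverse.map (fun c : Nat => ((c : Nat) : Int))) sol
      with hsol'
    have hlen' : sol'.length = sol.length := by rw [hsol', length_pvUpdM]
    have hcount : (((pvChildren arr v).map (fun c : Nat => (c : Int))).foldl
        (fun acc child => acc + (1 + PySem.List.pyGetD sol' child 0)) 0) = pvD arr v := by
      rw [PySem.List.foldl_add, List.map_map, pvD_eq, zero_add]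
      apply congrArg
      apply List.map_congr_left
      intro c hc
      have hb := pvChildren_bounds hc
      simp only [Function.comp_apply, PySem.List.pyGetD_natCast]
      rw [hsol', getD_pvUpdM arr _ sol c (by omega)]
      have hany : (((pvChildren arr v).reverse.map (fun c : Nat => ((c : Nat) : Int))).any
          (fun d => pvIn arr d ((c : Nat) : Int))) = true := by
        refine List.any_eq_true.mpr ⟨((c : Nat) : Int), ?_, pvIn_self arr _⟩
        exact List.mem_map.mpr ⟨c, List.mem_reverse.mpr hc, rfl⟩
      rw [if_pos hany]
    rw [hcount]
    have hvN : v = ((v.toNat : Nat) : Int) := by omega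
    rw [hvN, PySem.List.pySetD_natCast]
    apply congrArg
    apply List.ext_getElem (by simp [pvUpdM, hlen'])
    intro u h1 h2
    rw [List.getElem_set]
    have hu : u < sol.length := by
      rw [List.length_set, hlen'] at h1
      exact h1
    simp only [hsol']
    simp only [pvUpdM, List.getElem_map, List.getElem_range, List.any_cons, List.any_nil,
      Bool.or_false]
    have hweq : ((v.toNat : Nat) : Int) = v := by omega
    by_cases hvu : v.toNat = u
    · have huv : ((u : Nat) : Int) = v := by omega
      rw [if_pos hvu, hweq, huv]
      simp [pvIn_self arr v]
    · have huv : ¬ ((u : Nat) : Int) = v := by omega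
      rw [if_neg hvu, hweq]
      have h3 : pvIn arr v ((u : Nat) : Int) =
          ((pvChildren arr v).any (fun c => pvIn arr ((c : Nat) : Int) ((u : Nat) : Int))) := by
        rw [pvIn_eq, decide_eq_false huv, Bool.false_or]
      rw [h3]
      have h4 : (((pvChildren arr v).reverse.map (fun c : Nat => ((c : Nat) : Int))).any
            (fun d => pvIn arr d ((u : Nat) : Int))) =
          ((pvChildren arr v).any (fun c => pvIn arr ((c : Nat) : Int) ((u : Nat) : Int))) := by
        rw [List.any_map, List.any_reverse]
        rfl
      rw [h4]

theorem pvSz_le (arr : List Int) :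
    ∀ (K : Nat) (v : Int), pvRt arr v → arr.length + 3 - pvDepth arr v ≤ K →
      pvSz arr v ≤ (arr.length + 2) ^ (arr.length + 3 - pvDepth arr v) := by
  intro K
  induction K with
  | zero =>
    intro v hv hm
    have := pvRt_depth_le arr v hv
    omega
  | succ K ih =>
    intro v hv hm
    have hdep := pvRt_depth_le arr v hv
    rw [pvSz_eq]
    set X := (arr.length + 2) ^ (arr.length + 2 - pvDepth arr v) with hX
    have hchild : ∀ x ∈ (pvChildren arr v).map (fun c => pvSz arr ((c : Nat) : Int)), x ≤ X := by
      intro x hx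
      obtain ⟨c, hc, rfl⟩ := List.mem_map.mp hx
      have hrt := pvRt_of_child hv hc
      have hd := pvChildren_depth_rooted hv hc
      have := ih ((c : Nat) : Int) hrt (by omega)
      rw [hd] at this
      have hexp : arr.length + 3 - (pvDepth arr v + 1) = arr.length + 2 - pvDepth arr v := by
        omega
      rw [hexp] at this
      exact this
    have hsum : ((pvChildren arr v).map (fun c => pvSz arr ((c : Nat) : Int))).sum ≤
        arr.length * X := by
      have h1 := List.sum_le_card_nsmul _ X hchild
      have h2 : ((pvChildren arr v).map (fun c => pvSz arr ((c : Nat) : Int))).length ≤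
          arr.length := by
        rw [List.length_map]
        calc (pvChildren arr v).length ≤ (List.range arr.length).length :=
              List.length_filterMap_le _ _
        _ = arr.length := List.length_range
      calc ((pvChildren arr v).map (fun c => pvSz arr ((c : Nat) : Int))).sum
          ≤ _ • X := h1
        _ = _ * X := by rw [smul_eq_mul]
        _ ≤ arr.length * X := Nat.mul_le_mul_right X h2
    have hpow : (arr.length + 2) ^ (arr.length + 3 - pvDepth arr v) = (arr.length + 2) * X := by
      rw [hX, ← pow_succ']
      congr 1
      omega
    have hX1 : 1 ≤ X := Nat.one_le_pow _ _ (by omega)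
    rw [hpow]
    have hexpand : (arr.length + 2) * X = arr.length * X + 2 * X := by ring
    omega

theorem A_result (n : Int) (arr : List Int) (hn1 : 1 ≤ n) (hn2 : (arr.length : Int) ≤ n - 1) :
    solution n arr = (pvUpdM arr [1] (List.replicate (n + 1).toNat 0)).tail := by
  simp only [solution]
  have hrt1 : pvRt arr 1 := Or.inl rfl
  have hd1 : pvDepth arr 1 = 0 := by unfold pvDepth; simp
  have hsz1 : pvSz arr 1 ≤ (arr.length + 2) ^ (arr.length + 3) := by
    have := pvSz_le arr (arr.length + 3) 1 hrt1 (by omega)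
    rw [hd1] at this
    simpa using this
  have hfuel : (arr.length + 2) ^ (arr.length + 4) =
      ((arr.length + 2) ^ (arr.length + 4) - 2 * pvSz arr 1) + 2 * pvSz arr 1 := by
    have hp : (arr.length + 2) ^ (arr.length + 4) =
        (arr.length + 2) * (arr.length + 2) ^ (arr.length + 3) := by
      rw [← pow_succ']
    have h2 : 2 * pvSz arr 1 ≤ (arr.length + 2) * (arr.length + 2) ^ (arr.length + 3) :=
      Nat.mul_le_mul (by omega) hsz1
    omega
  have hkey := keyA arr (pvBuildTree arr) (fun w hw => tree_getD arr w hw)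
    (arr.length + 3) 1 hrt1 (by omega) []
    (List.replicate (n + 1).toNat 0)
    ((arr.length + 2) ^ (arr.length + 4) - 2 * pvSz arr 1)
    (by simp; omega)
  rw [hfuel, hkey, pvLoopA_nil, PySem.List.slice_from_one]

theorem pvChildren_empty_of_deep (arr : List Int) (a : Int)
    (h : arr.length + 2 ≤ pvDepth arr a) : pvChildren arr a = [] := by
  rw [List.eq_nil_iff_forall_not_mem]
  intro c hc
  have := pvChildren_bounds hc
  omega

-- subtree membership is preserved under taking (dictionary) children
theorem pvIn_trans_child (arr : List Int) :
    ∀ (K : Nat) (a b : Int), arr.length + 3 - pvDepth arr a ≤ K → pvIn arr a b = true →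
      ∀ c ∈ pvChildren arr b, pvIn arr a ((c : Nat) : Int) = true := by
  intro K
  induction K with
  | zero =>
    intro a b hm hab c hc
    rw [pvIn_eq] at hab
    rcases Bool.or_eq_true_iff.mp hab with h | h
    · have hba : b = a := by simpa using h
      subst hba
      rw [pvChildren_empty_of_deep arr b (by omega)] at hc
      simp at hc
    · obtain ⟨a', ha', _⟩ := List.any_eq_true.mp h
      have := pvChildren_bounds ha'
      omega
  | succ K ih =>
    intro a b hm hab c hc
    rw [pvIn_eq] at hab
    rcases Bool.or_eq_true_iff.mp hab with h | h
    · have hba : b = a := by simpa using h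
      subst hba
      rw [pvIn_eq]
      refine Bool.or_eq_true_iff.mpr (Or.inr (List.any_eq_true.mpr ⟨c, hc, pvIn_self arr _⟩))
    · obtain ⟨a', ha', haa⟩ := List.any_eq_true.mp h
      have hb := pvChildren_bounds ha'
      have := ih ((a' : Nat) : Int) b (by omega) haa c hc
      rw [pvIn_eq]
      exact Bool.or_eq_true_iff.mpr (Or.inr (List.any_eq_true.mpr ⟨a', ha', this⟩))

-- subtree membership strictly increases depth
theorem pvIn_depth_lt (arr : List Int) :
    ∀ (K : Nat) (a b : Int), arr.length + 3 - pvDepth arr a ≤ K → pvIn arr a b = true →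
      b ≠ a → pvDepth arr a < pvDepth arr b := by
  intro K
  induction K with
  | zero =>
    intro a b hm hab hne
    rw [pvIn_eq] at hab
    rcases Bool.or_eq_true_iff.mp hab with h | h
    · exact absurd (by simpa using h) hne
    · obtain ⟨a', ha', _⟩ := List.any_eq_true.mp h
      have := pvChildren_bounds ha'
      omega
  | succ K ih =>
    intro a b hm hab hne
    rw [pvIn_eq] at hab
    rcases Bool.or_eq_true_iff.mp hab with h | h
    · exact absurd (by simpa using h) hne
    · obtain ⟨a', ha', haa⟩ := List.any_eq_true.mp h
      have hb := pvChildren_bounds ha'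
      by_cases hba : b = ((a' : Nat) : Int)
      · subst hba
        omega
      · have := ih ((a' : Nat) : Int) b (by omega) haa hba
        omega

-- a strict subtree member is the cast of a child of some (unique) parent node
theorem pvIn_descent (arr : List Int) :
    ∀ (K : Nat) (a b : Int), arr.length + 3 - pvDepth arr a ≤ K → pvIn arr a b = true →
      b ≠ a → ∃ (q : Int) (cN : Nat), b = ((cN : Nat) : Int) ∧ cN ∈ pvChildren arr q ∧
        pvIn arr a q = true := by
  intro K
  induction K with
  | zero =>
    intro a b hm hab hne
    rw [pvIn_eq] at hab
    rcases Bool.or_eq_true_iff.mp hab with h | h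
    · exact absurd (by simpa using h) hne
    · obtain ⟨a', ha', _⟩ := List.any_eq_true.mp h
      have := pvChildren_bounds ha'
      omega
  | succ K ih =>
    intro a b hm hab hne
    rw [pvIn_eq] at hab
    rcases Bool.or_eq_true_iff.mp hab with h | h
    · exact absurd (by simpa using h) hne
    · obtain ⟨a', ha', haa⟩ := List.any_eq_true.mp h
      have hb := pvChildren_bounds ha'
      by_cases hba : b = ((a' : Nat) : Int)
      · exact ⟨a, a', hba, ha', pvIn_self arr a⟩
      · obtain ⟨q, cN, h1, h2, h3⟩ := ih ((a' : Nat) : Int) b (by omega) haa hba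
        refine ⟨q, cN, h1, h2, ?_⟩
        rw [pvIn_eq]
        exact Bool.or_eq_true_iff.mpr (Or.inr (List.any_eq_true.mpr ⟨a', ha', h3⟩))

theorem pvChildren_parent_unique (arr : List Int) {q1 q2 : Int} {c : Nat}
    (h1 : c ∈ pvChildren arr q1) (h2 : c ∈ pvChildren arr q2) : q1 = q2 := by
  obtain ⟨i1, _, hp1, _, _, he1⟩ := mem_pvChildren.mp h1
  obtain ⟨i2, _, hp2, _, _, he2⟩ := mem_pvChildren.mp h2
  have : i1 = i2 := by omega
  subst this
  rw [← hp1, hp2]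

-- two children of the same node with a common strict descendant coincide
theorem pvIn_sibling_unique (arr : List Int) :
    ∀ (D : Nat) (b : Int), pvDepth arr b ≤ D →
      ∀ (p : Int) (c1 c2 : Nat), c1 ∈ pvChildren arr p → c2 ∈ pvChildren arr p →
        pvIn arr ((c1 : Nat) : Int) b = true → pvIn arr ((c2 : Nat) : Int) b = true →
        c1 = c2 := by
  intro D
  induction D using Nat.strong_induction_on with
  | _ D ihD =>
    intro b hb p c1 c2 hc1 hc2 hin1 hin2
    have hguard1 := pvChildren_bounds hc1
    have hguard2 := pvChildren_bounds hc2
    by_cases hb1 : b = ((c1 : Nat) : Int)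
    · subst hb1
      by_cases h12 : c2 = c1
      · omega
      · exfalso
        obtain ⟨q, cN, hq1, hq2, hq3⟩ := pvIn_descent arr
          (arr.length + 3 - pvDepth arr ((c2 : Nat) : Int)) ((c2 : Nat) : Int)
          ((c1 : Nat) : Int) (by omega) hin2 (by intro hh; apply h12; omega)
        have hcN : cN = c1 := by omega
        subst hcN
        have hqp : q = p := pvChildren_parent_unique arr hq2 hc1
        rw [hqp] at hq3
        by_cases hpc : p = ((c2 : Nat) : Int)
        · rw [hpc] at hguard2
          omega
        · have := pvIn_depth_lt arr (arr.length + 3 - pvDepth arr ((c2 : Nat) : Int))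
            ((c2 : Nat) : Int) p (by omega) hq3 (fun hh => hpc hh)
          omega
    · by_cases hb2 : b = ((c2 : Nat) : Int)
      · subst hb2
        exfalso
        obtain ⟨q, cN, hq1, hq2, hq3⟩ := pvIn_descent arr
          (arr.length + 3 - pvDepth arr ((c1 : Nat) : Int)) ((c1 : Nat) : Int)
          ((c2 : Nat) : Int) (by omega) hin1 (by intro hh; apply hb1; omega)
        have hcN : cN = c2 := by omega
        subst hcN
        have hqp : q = p := pvChildren_parent_unique arr hq2 hc2
        rw [hqp] at hq3
        by_cases hpc : p = ((c1 : Nat) : Int)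
        · rw [hpc] at hguard1
          omega
        · have := pvIn_depth_lt arr (arr.length + 3 - pvDepth arr ((c1 : Nat) : Int))
            ((c1 : Nat) : Int) p (by omega) hq3 (fun hh => hpc hh)
          omega
      · obtain ⟨q1, u1, he1, hm1, hin1'⟩ := pvIn_descent arr
          (arr.length + 3 - pvDepth arr ((c1 : Nat) : Int)) ((c1 : Nat) : Int) b
          (by omega) hin1 hb1
        obtain ⟨q2, u2, he2, hm2, hin2'⟩ := pvIn_descent arr
          (arr.length + 3 - pvDepth arr ((c2 : Nat) : Int)) ((c2 : Nat) : Int) b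
          (by omega) hin2 hb2
        have hu : u1 = u2 := by omega
        subst hu
        have hq : q1 = q2 := pvChildren_parent_unique arr hm1 hm2
        subst hq
        have hguardu := pvChildren_bounds hm1
        have hdb : pvDepth arr b = pvDepth arr ((u1 : Nat) : Int) := by rw [he1]
        exact ihD (pvDepth arr q1) (by omega) q1 (by omega) p c1 c2 hc1 hc2 hin1' hin2'

-- every rooted node lies in the subtree of the root
theorem pvIn_root (arr : List Int) :
    ∀ (K : Nat) (u : Int), pvDepth arr u ≤ K → pvRt arr u → pvIn arr 1 u = true := by
  intro K
  induction K using Nat.strong_induction_on with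
  | _ K ihK =>
    intro u hK hu
    rcases hu with h1 | ⟨hin, hfin⟩
    · rw [h1]; exact pvIn_self arr 1
    · have hu2 : (2 : Int) ≤ u := hin.1
      have hmem : ∀ (w : Int), PySem.List.pyGetD arr (u - 2) 0 = w →
          u.toNat - 2 < arr.length ∧ arr.getD (u.toNat - 2) 0 = w ∧
            u = ((u.toNat - 2 + 2 : Nat) : Int) := by
        intro w hw
        have hiu : u - 2 = ((u.toNat - 2 : Nat) : Int) := by omega
        rw [hiu, PySem.List.pyGetD_natCast] at hw
        have := hin.2
        refine ⟨by omega, hw, by omega⟩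
      rcases pvChain_cases arr u hfin with ⟨_, hpar1, hch⟩ | ⟨hparin, hparfin, hch⟩
      · obtain ⟨hi, hgd, hcast⟩ := hmem 1 hpar1
        have humem : u.toNat - 2 + 2 ∈ pvChildren arr 1 :=
          (mem_pvChildren_rooted (Or.inl rfl)).mpr ⟨u.toNat - 2, hi, hgd, rfl⟩
        rw [pvIn_eq]
        refine Bool.or_eq_true_iff.mpr (Or.inr (List.any_eq_true.mpr
          ⟨u.toNat - 2 + 2, humem, ?_⟩))
        rw [← hcast]
        exact pvIn_self arr u
      · set par := PySem.List.pyGetD arr (u - 2) 0 with hpar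
        obtain ⟨hi, hgd, hcast⟩ := hmem par rfl
        have hdu : pvDepth arr u = (pvChain arr par).length + 2 := by
          unfold pvDepth
          rw [if_neg (by omega), hch]
          simp
        have hdpar : pvDepth arr par = (pvChain arr par).length + 1 := by
          unfold pvDepth
          rw [if_neg (by have := hparin.1; omega)]
        have hparrt : pvRt arr par := Or.inr ⟨hparin, hparfin⟩
        have hih := ihK (pvDepth arr par) (by omega) par (by omega) hparrt
        have humem : u.toNat - 2 + 2 ∈ pvChildren arr par :=
          (mem_pvChildren_rooted hparrt).mpr ⟨u.toNat - 2, hi, hgd, rfl⟩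
        have := pvIn_trans_child arr (arr.length + 3 - pvDepth arr 1) 1 par (by omega)
          hih _ humem
        rw [← hcast] at this
        exact this

-- a subtree member of a rooted node is rooted
theorem pvRt_of_pvIn (arr : List Int) :
    ∀ (K : Nat) (a : Int), arr.length + 3 - pvDepth arr a ≤ K → pvRt arr a →
      ∀ b, pvIn arr a b = true → pvRt arr b := by
  intro K
  induction K with
  | zero =>
    intro a hm ha b hab
    have := pvRt_depth_le arr a ha
    omega
  | succ K ih =>
    intro a hm ha b hab
    rw [pvIn_eq] at hab
    rcases Bool.or_eq_true_iff.mp hab with h | h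
    · have : b = a := by simpa using h
      rw [this]; exact ha
    · obtain ⟨a', ha', haa⟩ := List.any_eq_true.mp h
      have hrt' := pvRt_of_child ha ha'
      have hd' := pvChildren_depth_rooted ha ha'
      exact ih ((a' : Nat) : Int) (by omega) hrt' b haa

theorem pvParent_mem (arr : List Int) (x : Int) (hin : pvInR arr x) :
    x.toNat - 2 < arr.length ∧
      arr.getD (x.toNat - 2) 0 = PySem.List.pyGetD arr (x - 2) 0 ∧
      x = ((x.toNat - 2 + 2 : Nat) : Int) := by
  obtain ⟨h2, hm⟩ := hin
  have hiu : x - 2 = ((x.toNat - 2 : Nat) : Int) := by omega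
  refine ⟨by omega, ?_, by omega⟩
  rw [hiu, PySem.List.pyGetD_natCast]

theorem pvDepth_cons_facts (arr : List Int) (x : Int) (hin : pvInR arr x)
    (hch : pvChain arr x =
      PySem.List.pyGetD arr (x - 2) 0 :: pvChain arr (PySem.List.pyGetD arr (x - 2) 0))
    (hparin : pvInR arr (PySem.List.pyGetD arr (x - 2) 0)) :
    pvDepth arr x = (pvChain arr (PySem.List.pyGetD arr (x - 2) 0)).length + 2 ∧
      pvDepth arr (PySem.List.pyGetD arr (x - 2) 0) =
        (pvChain arr (PySem.List.pyGetD arr (x - 2) 0)).length + 1 := by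
  constructor
  · unfold pvDepth
    rw [if_neg (by have := hin.1; omega), hch]
    simp
  · unfold pvDepth
    rw [if_neg (by have := hparin.1; omega)]

-- (a) a chain member is a strict ancestor in the pvIn sense
theorem mem_chain_pvIn (arr : List Int) :
    ∀ (K : Nat) (x : Int), pvDepth arr x ≤ K → pvInR arr x → pvFin arr x = 1 →
      ∀ u ∈ pvChain arr x, pvIn arr u x = true ∧ u ≠ x := by
  intro K
  induction K using Nat.strong_induction_on with
  | _ K ihK =>
    intro x hK hin hfin u hu
    obtain ⟨hi, hgd, hcast⟩ := pvParent_mem arr x hin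
    rcases pvChain_cases arr x hfin with ⟨_, _, hch⟩ | ⟨hparin, hparfin, hch⟩
    · rw [hch] at hu
      simp at hu
    · obtain ⟨hdu, hdpar⟩ := pvDepth_cons_facts arr x hin hch hparin
      have hparrt : pvRt arr (PySem.List.pyGetD arr (x - 2) 0) := Or.inr ⟨hparin, hparfin⟩
      have hxmem : x.toNat - 2 + 2 ∈ pvChildren arr (PySem.List.pyGetD arr (x - 2) 0) :=
        (mem_pvChildren_rooted hparrt).mpr ⟨x.toNat - 2, hi, hgd, rfl⟩
      rw [hch] at hu
      rcases List.mem_cons.mp hu with rfl | hu'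
      · constructor
        · rw [pvIn_eq]
          refine Bool.or_eq_true_iff.mpr (Or.inr (List.any_eq_true.mpr
            ⟨x.toNat - 2 + 2, hxmem, ?_⟩))
          rw [← hcast]
          exact pvIn_self arr x
        · intro hux
          rw [hux] at hdu
          have hdx : pvDepth arr x = (pvChain arr x).length + 1 := by
            unfold pvDepth
            rw [if_neg (by have := hin.1; omega)]
          omega
      · obtain ⟨hin', hne'⟩ := ihK (pvDepth arr (PySem.List.pyGetD arr (x - 2) 0)) (by omega)
          (PySem.List.pyGetD arr (x - 2) 0) (by omega) hparin hparfin u hu'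
        constructor
        · have := pvIn_trans_child arr (arr.length + 3 - pvDepth arr u) u
            (PySem.List.pyGetD arr (x - 2) 0) (by omega) hin' _ hxmem
          rw [← hcast] at this
          exact this
        · have hlt := pvIn_depth_lt arr (arr.length + 3 - pvDepth arr u) u
            (PySem.List.pyGetD arr (x - 2) 0) (by omega) hin' (fun hh => hne' hh.symm)
          intro hux
          rw [hux] at hlt
          omega

-- (b) a strict ancestor is the root or a chain member
theorem pvIn_chain_mem (arr : List Int) :
    ∀ (K : Nat) (x : Int), pvDepth arr x ≤ K → pvInR arr x → pvFin arr x = 1 →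
      ∀ u : Int, pvIn arr u x = true → u ≠ x → (u = 1 ∨ u ∈ pvChain arr x) := by
  intro K
  induction K using Nat.strong_induction_on with
  | _ K ihK =>
    intro x hK hin hfin u huin hune
    obtain ⟨hi, hgd, hcast⟩ := pvParent_mem arr x hin
    obtain ⟨q, cN, hq1, hq2, hq3⟩ := pvIn_descent arr (arr.length + 3 - pvDepth arr u) u x
      (by omega) huin (fun hh => hune hh.symm)
    have hcN : cN = x.toNat - 2 + 2 := by omega
    subst hcN
    obtain ⟨iq, hiq, hgq, _, _, heq⟩ := mem_pvChildren.mp hq2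
    have hiq2 : iq = x.toNat - 2 := by omega
    subst hiq2
    have hqpar : q = PySem.List.pyGetD arr (x - 2) 0 := by rw [← hgq, hgd]
    rcases pvChain_cases arr x hfin with ⟨_, hpar1, hch⟩ | ⟨hparin, hparfin, hch⟩
    · left
      rw [hqpar, hpar1] at hq3
      by_contra hu1
      have := pvIn_depth_lt arr (arr.length + 3 - pvDepth arr u) u 1 (by omega) hq3
        (fun hh => hu1 hh.symm)
      unfold pvDepth at this
      simp at this
    · obtain ⟨hdu, hdpar⟩ := pvDepth_cons_facts arr x hin hch hparin
      rw [hqpar] at hq3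
      by_cases hupar : u = PySem.List.pyGetD arr (x - 2) 0
      · right
        rw [hch, hupar]
        exact List.mem_cons_self
      · rcases ihK (pvDepth arr (PySem.List.pyGetD arr (x - 2) 0)) (by omega)
          (PySem.List.pyGetD arr (x - 2) 0) (by omega) hparin hparfin u hq3 hupar
          with h1 | h2
        · exact Or.inl h1
        · right
          rw [hch]
          exact List.mem_cons_of_mem _ h2

-- the contribution of the walk from x to the counter at index u
def pvContrib (arr : List Int) (x u : Int) : Int :=
  if pvFin arr x = 1 then (if u = 1 then 1 else 0) + ((pvChain arr x).count u : Int) else 0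

theorem foldl_incr (L : List Int) :
    ∀ (sol : List Int), (∀ v ∈ L, 1 ≤ v ∧ v.toNat < sol.length) →
      ((L.foldl (fun s v => PySem.List.pySetD s v (PySem.List.pyGetD s v 0 + 1)) sol).length =
        sol.length) ∧
      ∀ u, u < sol.length →
        (L.foldl (fun s v => PySem.List.pySetD s v (PySem.List.pyGetD s v 0 + 1)) sol).getD u 0 =
          sol.getD u 0 + (L.count ((u : Nat) : Int) : Int) := by
  induction L with
  | nil => intro sol _; simp
  | cons v L ih =>
    intro sol hb
    obtain ⟨hv1, hv2⟩ := hb v List.mem_cons_self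
    have hvcast : v = ((v.toNat : Nat) : Int) := by omega
    simp only [List.foldl_cons]
    rw [hvcast, PySem.List.pySetD_natCast, PySem.List.pyGetD_natCast]
    have hlen' : (sol.set v.toNat (sol.getD v.toNat 0 + 1)).length = sol.length := by
      rw [List.length_set]
    obtain ⟨ihl, ihv⟩ := ih (sol.set v.toNat (sol.getD v.toNat 0 + 1)) (fun w hw => by
      have := hb w (List.mem_cons_of_mem v hw)
      omega)
    refine ⟨by rw [ihl, hlen'], ?_⟩
    intro u hu
    rw [ihv u (by rw [hlen']; exact hu)]
    have hgd : (sol.set v.toNat (sol.getD v.toNat 0 + 1)).getD u 0 =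
        if v.toNat = u then sol.getD v.toNat 0 + 1 else sol.getD u 0 := by
      rw [List.getD_eq_getElem _ 0 (by rw [hlen']; exact hu), List.getElem_set]
      split
      · rfl
      · exact (List.getD_eq_getElem _ 0 (by omega)).symm
    rw [hgd, List.count_cons]
    by_cases hvu : v.toNat = u
    · subst hvu
      rw [if_pos rfl]
      simp only [beq_self_eq_true, if_true]
      push_cast
      ring
    · rw [if_neg hvu, if_neg (by simp only [beq_iff_eq]; omega)]
      push_cast
      ring

theorem foldl_outer (arr : List Int) :
    ∀ (cs : List Int) (sol : List Int), arr.length + 2 ≤ sol.length →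
      ((cs.foldl (fun sol c =>
          if (pvWalk arr (arr.length + 1) c []).2 = 1 then
            (pvWalk arr (arr.length + 1) c []).1.foldl (fun sol v =>
              PySem.List.pySetD sol v (PySem.List.pyGetD sol v 0 + 1))
              (PySem.List.pySetD sol 1 (PySem.List.pyGetD sol 1 0 + 1))
          else sol) sol).length = sol.length) ∧
      ∀ u, u < sol.length →
        (cs.foldl (fun sol c =>
          if (pvWalk arr (arr.length + 1) c []).2 = 1 then
            (pvWalk arr (arr.length + 1) c []).1.foldl (fun sol v =>
              PySem.List.pySetD sol v (PySem.List.pyGetD sol v 0 + 1))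
              (PySem.List.pySetD sol 1 (PySem.List.pyGetD sol 1 0 + 1))
          else sol) sol).getD u 0 =
          sol.getD u 0 + (cs.map (fun c => pvContrib arr c ((u : Nat) : Int))).sum := by
  intro cs
  induction cs with
  | nil => intro sol _; simp
  | cons c cs ih =>
    intro sol hlen
    simp only [List.foldl_cons, List.map_cons, List.sum_cons]
    by_cases hfin : (pvWalk arr (arr.length + 1) c []).2 = 1
    · rw [if_pos hfin]
      have hone : (1 : Int) = ((1 : Nat) : Int) := rfl
      have hsol1' : PySem.List.pySetD sol 1 (PySem.List.pyGetD sol 1 0 + 1) =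
          sol.set 1 (sol.getD 1 0 + 1) := by
        rw [hone, PySem.List.pySetD_natCast, PySem.List.pyGetD_natCast]
      rw [hsol1']
      have hlen1 : (sol.set 1 (sol.getD 1 0 + 1)).length = sol.length := by
        rw [List.length_set]
      have hbounds : ∀ v ∈ (pvWalk arr (arr.length + 1) c []).1,
          1 ≤ v ∧ v.toNat < (sol.set 1 (sol.getD 1 0 + 1)).length := by
        intro v hv
        have := pvChain_mem_InR arr (arr.length + 1) c v hv
        unfold pvInR at this
        omega
      obtain ⟨hl2, hv2⟩ := foldl_incr (pvWalk arr (arr.length + 1) c []).1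
        (sol.set 1 (sol.getD 1 0 + 1)) hbounds
      obtain ⟨ihl, ihv⟩ := ih ((pvWalk arr (arr.length + 1) c []).1.foldl
        (fun sol v => PySem.List.pySetD sol v (PySem.List.pyGetD sol v 0 + 1))
        (sol.set 1 (sol.getD 1 0 + 1))) (by omega)
      refine ⟨by omega, ?_⟩
      intro u hu
      rw [ihv u (by omega), hv2 u (by omega)]
      have hs1 : (sol.set 1 (sol.getD 1 0 + 1)).getD u 0 =
          sol.getD u 0 + (if ((u : Nat) : Int) = 1 then 1 else 0) := by
        rw [List.getD_eq_getElem _ 0 (by omega), List.getElem_set]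
        by_cases h1u : u = 1
        · subst h1u
          rw [if_pos rfl, if_pos (by norm_num), List.getD_eq_getElem _ 0 (by omega)]
        · rw [if_neg (fun hh => h1u hh.symm), if_neg (by omega)]
          simp [List.getD_eq_getElem?_getD, List.getElem?_eq_getElem hu]
      rw [hs1]
      have hcon : pvContrib arr c ((u : Nat) : Int) =
          (if ((u : Nat) : Int) = 1 then 1 else 0) +
            ((pvChain arr c).count ((u : Nat) : Int) : Int) := by
        unfold pvContrib
        rw [if_pos (show pvFin arr c = 1 from hfin)]
      rw [hcon]
      unfold pvChain
      ring
    · rw [if_neg hfin]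
      obtain ⟨ihl, ihv⟩ := ih sol hlen
      refine ⟨ihl, ?_⟩
      intro u hu
      rw [ihv u hu]
      have hcon : pvContrib arr c ((u : Nat) : Int) = 0 := by
        unfold pvContrib
        rw [if_neg (show ¬ pvFin arr c = 1 from hfin)]
      rw [hcon]
      ring

theorem pvContrib_eq (arr : List Int) (c : Int) (hc : pvInR arr c) (u : Int)
    (hu : pvRt arr u) :
    pvContrib arr c u =
      if pvFin arr c = 1 ∧ pvIn arr u c = true ∧ u ≠ c then 1 else 0 := by
  by_cases hfin : pvFin arr c = 1
  · unfold pvContrib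
    rw [if_pos hfin]
    have hnodup := pvChain_nodup arr c hc hfin
    by_cases hu1 : u = 1
    · subst hu1
      have h1c : (1 : Int) ≠ c := by have := hc.1; omega
      have hin1 : pvIn arr 1 c = true :=
        pvIn_root arr (pvDepth arr c) c le_rfl (Or.inr ⟨hc, hfin⟩)
      have hcnt : (pvChain arr c).count 1 = 0 := List.count_eq_zero.mpr (fun hmem =>
        pvInR_one arr (pvChain_mem_InR arr (arr.length + 1) c 1 hmem))
      rw [if_pos (And.intro hfin (And.intro hin1 h1c)), hcnt, if_pos rfl]
      norm_num
    · rw [if_neg hu1]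
      by_cases hmem : u ∈ pvChain arr c
      · obtain ⟨hpin, hpne⟩ := mem_chain_pvIn arr (pvDepth arr c) c le_rfl hc hfin u hmem
        rw [List.count_eq_one_of_mem hnodup hmem,
          if_pos (And.intro hfin (And.intro hpin hpne))]
        norm_num
      · rw [List.count_eq_zero.mpr hmem]
        have hno : ¬ (pvFin arr c = 1 ∧ pvIn arr u c = true ∧ u ≠ c) := by
          rintro ⟨_, hin, hne⟩
          rcases pvIn_chain_mem arr (pvDepth arr c) c le_rfl hc hfin u hin hne with h | h
          · exact hu1 h
          · exact hmem h
        rw [if_neg hno]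
        norm_num
  · unfold pvContrib
    rw [if_neg hfin, if_neg (fun hh => hfin hh.1)]

theorem sum_ind_unique (cs : List Nat) (p : Nat → Prop) [DecidablePred p] :
    cs.Nodup → (∀ a ∈ cs, ∀ b ∈ cs, p a → p b → a = b) →
      (cs.map (fun a => if p a then (1 : Int) else 0)).sum =
        if ∃ a ∈ cs, p a then 1 else 0 := by
  induction cs with
  | nil => intro _ _; simp
  | cons a cs ih =>
    intro hnd huniq
    obtain ⟨hna, hnd'⟩ := List.nodup_cons.mp hnd
    simp only [List.map_cons, List.sum_cons]
    by_cases hpa : p a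
    · rw [if_pos hpa]
      have hnone : ¬ ∃ b ∈ cs, p b := by
        rintro ⟨b, hb, hpb⟩
        exact hna (huniq a List.mem_cons_self b (List.mem_cons_of_mem a hb) hpa hpb ▸ hb)
      rw [ih hnd' (fun x hx y hy => huniq x (List.mem_cons_of_mem a hx) y
        (List.mem_cons_of_mem a hy)), if_neg hnone,
        if_pos ⟨a, List.mem_cons_self, hpa⟩]
      norm_num
    · rw [if_neg hpa,
        ih hnd' (fun x hx y hy => huniq x (List.mem_cons_of_mem a hx) y
          (List.mem_cons_of_mem a hy))]
      have hiff : (∃ b ∈ cs, p b) ↔ (∃ b ∈ a :: cs, p b) := by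
        constructor
        · rintro ⟨b, hb, hpb⟩; exact ⟨b, List.mem_cons_of_mem a hb, hpb⟩
        · rintro ⟨b, hb, hpb⟩
          rcases List.mem_cons.mp hb with rfl | hb'
          · exact absurd hpb hpa
          · exact ⟨b, hb', hpb⟩
      by_cases he : ∃ b ∈ cs, p b
      · rw [if_pos he, if_pos (hiff.mp he)]
        norm_num
      · rw [if_neg he, if_neg (fun hh => he (hiff.mpr hh))]
        norm_num

theorem pvIn_split (arr : List Int) (u : Int) (c : Int) :
    (pvIn arr u c = true ∧ u ≠ c) ↔
      ∃ c' ∈ pvChildren arr u, pvIn arr ((c' : Nat) : Int) c = true := by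
  constructor
  · rintro ⟨hin, hne⟩
    rw [pvIn_eq] at hin
    rcases Bool.or_eq_true_iff.mp hin with h | h
    · have hcu : c = u := by simpa using h
      exact absurd hcu.symm hne
    · obtain ⟨c', hc', hp⟩ := List.any_eq_true.mp h
      exact ⟨c', hc', hp⟩
  · rintro ⟨c', hc', hp⟩
    have hbnd := pvChildren_bounds hc'
    constructor
    · rw [pvIn_eq]
      exact Bool.or_eq_true_iff.mpr (Or.inr (List.any_eq_true.mpr ⟨c', hc', hp⟩))
    · intro huc
      subst huc
      by_cases hcc : ((c' : Nat) : Int) = u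
      · rw [hcc] at hbnd
        omega
      · have := pvIn_depth_lt arr (arr.length + 3 - pvDepth arr ((c' : Nat) : Int))
          ((c' : Nat) : Int) u (by omega) hp (fun hh => hcc hh.symm)
        omega

theorem contrib_decomp (arr : List Int) (u : Int) (hu : pvRt arr u) (c : Int)
    (hcInR : pvInR arr c) :
    pvContrib arr c u =
      ((pvChildren arr u).map (fun c' => (if c = ((c' : Nat) : Int) then (1 : Int) else 0) +
        pvContrib arr c ((c' : Nat) : Int))).sum := by
  have hterm : ∀ c' ∈ pvChildren arr u,
      (if c = ((c' : Nat) : Int) then (1 : Int) else 0) + pvContrib arr c ((c' : Nat) : Int) =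
        if pvFin arr c = 1 ∧ pvIn arr ((c' : Nat) : Int) c = true then 1 else 0 := by
    intro c' hc'
    have hrt' := pvRt_of_child hu hc'
    rw [pvContrib_eq arr c hcInR _ hrt']
    by_cases hcc : c = ((c' : Nat) : Int)
    · have hfin' : pvFin arr ((c' : Nat) : Int) = 1 := by
        rcases hrt' with h1 | ⟨_, h2⟩
        · have hbnd := pvChildren_bounds hc'
          omega
        · exact h2
      rw [if_pos hcc, if_neg (by rintro ⟨_, _, hne⟩; exact hne hcc.symm),
        if_pos ⟨by rw [hcc]; exact hfin', by rw [hcc]; exact pvIn_self arr _⟩]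
      norm_num
    · rw [if_neg hcc]
      by_cases hcase : pvFin arr c = 1 ∧ pvIn arr ((c' : Nat) : Int) c = true
      · rw [if_pos ⟨hcase.1, hcase.2, fun hh => hcc hh.symm⟩, if_pos hcase]
        norm_num
      · rw [if_neg (by rintro ⟨ha, hb, _⟩; exact hcase ⟨ha, hb⟩), if_neg hcase]
        norm_num
  rw [List.map_congr_left hterm,
    sum_ind_unique (pvChildren arr u)
      (fun c' => pvFin arr c = 1 ∧ pvIn arr ((c' : Nat) : Int) c = true)
      (nodup_pvChildren arr u)
      (fun a ha b hb hpa hpb => pvIn_sibling_unique arr (pvDepth arr c) c le_rfl u a b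
        ha hb hpa.2 hpb.2),
    pvContrib_eq arr c hcInR u hu]
  by_cases hcase : pvFin arr c = 1 ∧ pvIn arr u c = true ∧ u ≠ c
  · rw [if_pos hcase, if_pos (by
      obtain ⟨c', hc', hp⟩ := (pvIn_split arr u c).mp ⟨hcase.2.1, hcase.2.2⟩
      exact ⟨c', hc', hcase.1, hp⟩)]
  · rw [if_neg hcase, if_neg (by
      rintro ⟨c', hc', hfin', hp⟩
      obtain ⟨ha, hb⟩ := (pvIn_split arr u c).mpr ⟨c', hc', hp⟩
      exact hcase ⟨hfin', ha, hb⟩)]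

theorem sum_sum_comm (l1 : List Int) (l2 : List Nat) (f : Int → Nat → Int) :
    (l1.map (fun c => (l2.map (fun c' => f c c')).sum)).sum =
      (l2.map (fun c' => (l1.map (fun c => f c c')).sum)).sum := by
  induction l1 with
  | nil =>
    simp only [List.map_nil, List.sum_nil]
    induction l2 with
    | nil => simp
    | cons b l2 ih2 => simpa using ih2.symm
  | cons a l1 ih =>
    simp only [List.map_cons, List.sum_cons, ih]
    rw [← PySem.List.sum_map_add_int]

theorem sum_ind_count (l : List Int) (a : Int) :
    (l.map (fun c => if c = a then (1 : Int) else 0)).sum = (l.count a : Int) := by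
  induction l with
  | nil => simp
  | cons b l ih =>
    simp only [List.map_cons, List.sum_cons, List.count_cons, ih]
    by_cases hba : b = a
    · rw [if_pos hba, if_pos (by simp [hba])]
      push_cast
      ring
    · rw [if_neg hba, if_neg (by simp only [beq_iff_eq]; omega)]
      push_cast
      ring

theorem mainCount (arr : List Int) :
    ∀ (K : Nat) (u : Int), arr.length + 3 - pvDepth arr u ≤ K → pvRt arr u →
      pvD arr u = ((PySem.List.pyRange 2 ((arr.length : Int) + 2) 1).map
        (fun c => pvContrib arr c u)).sum := by
  intro K
  induction K with
  | zero =>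
    intro u hm hu
    have := pvRt_depth_le arr u hu
    omega
  | succ K ih =>
    intro u hm hu
    have hdec : ∀ c ∈ PySem.List.pyRange 2 ((arr.length : Int) + 2) 1,
        pvContrib arr c u =
          ((pvChildren arr u).map (fun c' => (if c = ((c' : Nat) : Int) then (1 : Int) else 0) +
            pvContrib arr c ((c' : Nat) : Int))).sum := by
      intro c hc
      have hcr := (PySem.List.mem_pyRange_one).mp hc
      exact contrib_decomp arr u hu c ⟨hcr.1, by omega⟩
    rw [List.map_congr_left hdec,
      sum_sum_comm _ _ (fun c c' => (if c = ((c' : Nat) : Int) then (1 : Int) else 0) +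
        pvContrib arr c ((c' : Nat) : Int)),
      pvD_eq]
    apply congrArg
    apply List.map_congr_left
    intro c' hc'
    rw [PySem.List.sum_map_add_int, sum_ind_count]
    have hbnd := pvChildren_bounds hc'
    have hmem : ((c' : Nat) : Int) ∈ PySem.List.pyRange 2 ((arr.length : Int) + 2) 1 :=
      PySem.List.mem_pyRange_one.mpr ⟨by omega, by omega⟩
    have hcnt : (PySem.List.pyRange 2 ((arr.length : Int) + 2) 1).count ((c' : Nat) : Int) = 1 :=
      List.count_eq_one_of_mem (PySem.List.nodup_pyRange_one 2 ((arr.length : Int) + 2)) hmem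
    have hrt' := pvRt_of_child hu hc'
    have hd' := pvChildren_depth_rooted hu hc'
    rw [hcnt, ← ih ((c' : Nat) : Int) (by omega) hrt']
    norm_num

theorem bridge (arr : List Int) (L : Nat) (hL : arr.length + 2 ≤ L) :
    pvUpdM arr [1] (List.replicate L 0) =
      (List.range L).map (fun u =>
        ((PySem.List.pyRange 2 ((arr.length : Int) + 2) 1).map
          (fun c => pvContrib arr c ((u : Nat) : Int))).sum) := by
  apply List.ext_getElem (by simp [pvUpdM])
  intro u h1 h2
  rw [getElem_pvUpdM]
  simp only [List.getElem_map, List.getElem_range, List.any_cons, List.any_nil, Bool.or_false]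
  have huL : u < L := by simpa using h2
  have hrep : (List.replicate L (0 : Int)).getD u 0 = 0 := by
    simp only [List.getD_eq_getElem?_getD, List.getElem?_replicate]
    rw [if_pos huL]
    rfl
  by_cases hin : pvIn arr 1 ((u : Nat) : Int) = true
  · rw [if_pos hin]
    have hrt : pvRt arr ((u : Nat) : Int) := by
      have hd1 : pvDepth arr 1 = 0 := by unfold pvDepth; simp
      exact pvRt_of_pvIn arr (arr.length + 3) 1 (by omega) (Or.inl rfl) _ hin
    exact mainCount arr (arr.length + 3 - pvDepth arr ((u : Nat) : Int)) _ le_rfl hrt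
  · rw [if_neg hin, hrep]
    symm
    have hzero : ∀ c ∈ PySem.List.pyRange 2 ((arr.length : Int) + 2) 1,
        pvContrib arr c ((u : Nat) : Int) = 0 := by
      intro c hc
      have hcr := PySem.List.mem_pyRange_one.mp hc
      have hcin : pvInR arr c := ⟨hcr.1, by omega⟩
      by_cases hfin : pvFin arr c = 1
      · unfold pvContrib
        rw [if_pos hfin]
        have hu1 : ¬ ((u : Nat) : Int) = 1 := by
          intro hh
          rw [hh] at hin
          exact hin (pvIn_self arr 1)
        have hmem : ¬ ((u : Nat) : Int) ∈ pvChain arr c := by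
          intro hmem
          obtain ⟨hinr, hfin'⟩ := pvChain_mem_rooted arr (pvChain arr c).length c le_rfl
            hfin _ hmem
          exact hin (pvIn_root arr (pvDepth arr ((u : Nat) : Int)) _ le_rfl
            (Or.inr ⟨hinr, hfin'⟩))
        rw [if_neg hu1, List.count_eq_zero.mpr hmem]
        norm_num
      · unfold pvContrib
        rw [if_neg hfin]
    rw [List.map_congr_left hzero]
    simp

theorem B_result (n : Int) (arr : List Int) (hn1 : 1 ≤ n) (hn2 : (arr.length : Int) ≤ n - 1) :
    solution_alt n arr = ((List.range (n + 1).toNat).map (fun u =>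
      ((PySem.List.pyRange 2 ((arr.length : Int) + 2) 1).map
        (fun c => pvContrib arr c ((u : Nat) : Int))).sum)).tail := by
  simp only [solution_alt]
  rw [PySem.List.slice_from_one]
  apply congrArg
  have hfun : (fun (sol : List Int) (c : Int) =>
      let w := pvWalk arr (arr.length + 1) c []
      if w.2 = 1 then
        let sol := PySem.List.pySetD sol 1 (PySem.List.pyGetD sol 1 0 + 1)
        w.1.foldl (fun sol v => PySem.List.pySetD sol v (PySem.List.pyGetD sol v 0 + 1)) sol
      else sol) = (fun sol c =>
      if (pvWalk arr (arr.length + 1) c []).2 = 1 then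
        (pvWalk arr (arr.length + 1) c []).1.foldl
          (fun sol v => PySem.List.pySetD sol v (PySem.List.pyGetD sol v 0 + 1))
          (PySem.List.pySetD sol 1 (PySem.List.pyGetD sol 1 0 + 1))
      else sol) := rfl
  rw [hfun]
  obtain ⟨hl, hv⟩ := foldl_outer arr (PySem.List.pyRange 2 ((arr.length : Int) + 2) 1)
    (List.replicate (n + 1).toNat 0) (by simp; omega)
  apply List.ext_getElem (by simp only [hl]; simp)
  intro u h1 h2
  have hu : u < (n + 1).toNat := by simpa using h2
  have hrep : (List.replicate (n + 1).toNat (0 : Int)).getD u 0 = 0 := by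
    simp only [List.getD_eq_getElem?_getD, List.getElem?_replicate]
    rw [if_pos hu]
    rfl
  rw [← List.getD_eq_getElem _ 0 h1, hv u (by simpa using hu), hrep]
  simp only [List.getElem_map, List.getElem_range]
  ring

-- ===== no-root branch: when 1 never occurs in arr, both sides return all zeros =====
theorem pyGetD_ne_one (arr : List Int) (hno : (1 : Int) ∉ arr) (i : Int) :
    PySem.List.pyGetD arr i 0 ≠ 1 := by
  by_cases h : PySem.Raise.InRange arr.length i
  · intro hh
    exact hno (hh ▸ PySem.List.pyGetD_mem arr 0 h)
  · have hnone : PySem.List.pyGet? arr i = none := (PySem.List.pyGet?_eq_none_iff arr i).mpr h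
    rw [PySem.List.pyGetD_of_none arr i 0 hnone]
    omega

theorem pvWalk_ne_one (arr : List Int) (hno : (1 : Int) ∉ arr) :
    ∀ (f : Nat) (x : Int) (ch : List Int), x ≠ 1 → (pvWalk arr f x ch).2 ≠ 1 := by
  intro f
  induction f with
  | zero => intro x ch hx; exact hx
  | succ f ih =>
    intro x ch hx
    rw [pvWalk]
    split
    · exact ih _ _ (pyGetD_ne_one arr hno (x - 2))
    · exact pyGetD_ne_one arr hno (x - 2)

theorem set_replicate_zero (L : Nat) (i : Nat) :
    (List.replicate L (0 : Int)).set i 0 = List.replicate L 0 := by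
  apply List.ext_getElem (by simp)
  intro j h1 h2
  rw [List.getElem_set]
  split <;> simp

theorem A_result_noroot (n : Int) (arr : List Int) (hn1 : 1 ≤ n)
    (hno : (1 : Int) ∉ arr) :
    solution n arr = (List.replicate (n + 1).toNat 0).tail := by
  simp only [solution]
  have hch : (pvBuildTree arr).getD 1 [] = [] := by
    unfold pvBuildTree
    rw [getD_buildTree_gen, PySem.Dict.getD_empty, List.nil_append, enum_eq]
    rw [List.filter_eq_nil_iff.mpr, List.map_nil]
    intro q hq
    obtain ⟨i, hi, rfl⟩ := List.mem_map.mp hq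
    simp only [decide_eq_true_eq]
    intro hh
    rw [List.getD_eq_getElem arr 0 (by simpa using hi)] at hh
    exact hno (hh ▸ List.getElem_mem _)
  obtain ⟨k, hk⟩ : ∃ k, (arr.length + 2) ^ (arr.length + 4) = k + 2 := by
    refine ⟨(arr.length + 2) ^ (arr.length + 4) - 2, ?_⟩
    have h1 : 2 ^ (arr.length + 4) ≤ (arr.length + 2) ^ (arr.length + 4) :=
      Nat.pow_le_pow_left (by omega) _
    have h2 : 2 ≤ 2 ^ (arr.length + 4) := by
      calc (2 : Nat) = 2 ^ 1 := rfl
      _ ≤ 2 ^ (arr.length + 4) := Nat.pow_le_pow_right (by omega) (by omega)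
    omega
  rw [hk, pvLoopA_push, hch]
  simp only [List.map_nil, List.reverse_nil, List.nil_append]
  rw [pvLoopA_visit, hch]
  simp only [List.foldl_nil]
  rw [PySem.List.pySetD_of_nonneg _ _ (by norm_num), set_replicate_zero, pvLoopA_nil,
    PySem.List.slice_from_one]

theorem B_result_noroot (n : Int) (arr : List Int) (hno : (1 : Int) ∉ arr) :
    solution_alt n arr = (List.replicate (n + 1).toNat 0).tail := by
  simp only [solution_alt]
  rw [PySem.List.slice_from_one]
  apply congrArg
  have hid : ∀ (cs : List Int), (∀ c ∈ cs, c ≠ 1) → ∀ sol : List Int,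
      cs.foldl (fun sol c =>
        let w := pvWalk arr (arr.length + 1) c []
        if w.2 = 1 then
          let sol := PySem.List.pySetD sol 1 (PySem.List.pyGetD sol 1 0 + 1)
          w.1.foldl (fun sol v =>
            PySem.List.pySetD sol v (PySem.List.pyGetD sol v 0 + 1)) sol
        else sol) sol = sol := by
    intro cs
    induction cs with
    | nil => intro _ sol; rfl
    | cons c cs ih =>
      intro hne sol
      simp only [List.foldl_cons]
      rw [if_neg (pvWalk_ne_one arr hno (arr.length + 1) c [] (hne c List.mem_cons_self))]
      exact ih (fun d hd => hne d (List.mem_cons_of_mem c hd)) sol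
  exact hid _ (fun c hc => by
    have := PySem.List.mem_pyRange_one.mp hc
    omega) _

-- ===== VERDICT (by name: the statement is the Claim_ definition above) =====
theorem solution_spec : Claim_equal_solution := by
  unfold Claim_equal_solution
  intro n arr _ hpre
  obtain ⟨h1, h2⟩ := hpre
  unfold Spec_solution
  rcases h2 with h2 | h2
  · have hL : arr.length + 2 ≤ (n + 1).toNat := by omega
    rw [A_result n arr h1 h2, B_result n arr h1 h2, bridge arr (n + 1).toNat hL]
  · rw [A_result_noroot n arr h1 h2, B_result_noroot n arr h2]
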